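-- pv_equiv track=rewrite | github.com/nyxssmith/jenkinsTests | fontio3/fontio3/utilities/pp.py | analyze_diff_mapping
-- ===== SOURCE A (Python) =====
-- def analyze_diff_mapping(currObj, priorObj):
--     """
--     Analyzes the differences in the two mappings and returns three sets whose
--     values are keys: added, deleted and changed.
--
--     >>> d1 = {'a': 2, 'c': 5, 'd': 9, 'e': -3}
--     >>> d2 = {'a': 3, 'b': 8, 'e': -3}
--     >>> analyze_diff_mapping(d2, d1) == ({'b'}, {'c', 'd'}, {'a'})
--     True
--     """
--
--     added = set()
--     changed = set()
--
--     for key in currObj: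
--         if key in priorObj:
--             currValue = currObj[key]
--             priorValue = priorObj[key]
--
--             if currValue is not priorValue and currValue != priorValue:
--                 changed.add(key)
--
--         else:
--             added.add(key)
--
--     deleted = set(key for key in priorObj if key not in currObj)
--
--     return added, deleted, changed
-- ===== SOURCE B (Python) =====
-- _MISS = object()
--
--
-- def analyze_diff_mapping(currObj, priorObj):
--     # Merge both mappings into one table keyed by the union of the keys,
--     # each key carrying the pair (currValue-or-MISS, priorValue-or-MISS),
--     # then classify every key in a single pass over the merged table.
--     merged = {k: (currObj[k], _MISS) for k in currObj}
--     for k in priorObj: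
--         cv = merged[k][0] if k in merged else _MISS
--         merged[k] = (cv, priorObj[k])
--     added, deleted, changed = set(), set(), set()
--     for k, (cv, pv) in merged.items():
--         if pv is _MISS:
--             added.add(k)
--         elif cv is _MISS:
--             deleted.add(k)
--         elif cv is not pv and cv != pv:
--             changed.add(k)
--     return added, deleted, changed
-- ===== Notes on version B (the rewrite author's own statement) =====
-- stated objective: alternative
-- what changed: B first merges both mappings into one union table keyed by every key with an (optional curr value, optional prior value) pair, then classifies all keys in a single pass over that table, instead of A's separate loop over currObj plus a generator pass over priorObj with three set accumulators.
import Mathlib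
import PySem

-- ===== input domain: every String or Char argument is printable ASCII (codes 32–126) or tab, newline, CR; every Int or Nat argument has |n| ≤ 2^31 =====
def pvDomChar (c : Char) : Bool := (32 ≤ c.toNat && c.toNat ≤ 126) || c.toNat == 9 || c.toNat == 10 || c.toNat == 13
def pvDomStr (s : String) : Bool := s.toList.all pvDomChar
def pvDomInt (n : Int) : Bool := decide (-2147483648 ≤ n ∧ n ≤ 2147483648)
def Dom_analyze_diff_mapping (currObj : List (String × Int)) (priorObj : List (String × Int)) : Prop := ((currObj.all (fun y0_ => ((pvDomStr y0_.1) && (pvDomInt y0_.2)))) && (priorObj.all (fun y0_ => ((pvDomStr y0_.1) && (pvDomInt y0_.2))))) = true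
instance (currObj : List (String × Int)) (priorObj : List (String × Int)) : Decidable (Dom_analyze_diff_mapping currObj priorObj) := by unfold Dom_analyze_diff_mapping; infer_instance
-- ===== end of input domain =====

-- B merges both mappings into one union table of (optional curr value, optional prior value)
-- pairs and classifies every key in a single pass over it, instead of A's loop over currObj
-- plus a generator pass over priorObj; same O(n+m) cost, a different decomposition.
-- The dicts arrive as association lists; both ports read them through PySem.Dict.ofList
-- (Python dict construction: later duplicate keys overwrite in place).
-- Python's `cv is not pv and cv != pv` is ported as `≠`: for int values `!=` already
-- implies `is not`, so the identity guard adds nothing; B's `_MISS` sentinel is `none`.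

-- ===== PORT A =====
def analyze_diff_mapping (currObj : List (String × Int)) (priorObj : List (String × Int)) : List String × List String × List String :=
  let c := PySem.Dict.ofList currObj
  let p := PySem.Dict.ofList priorObj
  let ac := c.keys.foldl
    (fun (ac : PySem.Set String × PySem.Set String) key =>
      if p.contains key then
        if c.getD key 0 ≠ p.getD key 0 then (ac.1, PySem.Set.add ac.2 key) else ac
      else (PySem.Set.add ac.1 key, ac.2))
    (PySem.Set.empty, PySem.Set.empty)
  let deleted : PySem.Set String := PySem.Set.ofList (p.keys.filter (fun key => !c.contains key))
  (ac.1, deleted, ac.2)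

-- ===== PORT B =====
def analyze_diff_mapping_alt (currObj : List (String × Int)) (priorObj : List (String × Int)) : List String × List String × List String :=
  let c := PySem.Dict.ofList currObj
  let p := PySem.Dict.ofList priorObj
  -- merged = {k: (currObj[k], _MISS) for k in currObj}
  let merged : PySem.Dict String (Option Int × Option Int) :=
    c.items.foldl (fun m kv => m.insert kv.1 (some kv.2, none)) PySem.Dict.empty
  -- for k in priorObj: cv = merged[k][0] if k in merged else _MISS; merged[k] = (cv, priorObj[k])
  let merged := p.items.foldl
    (fun m kv =>
      let cv := if m.contains kv.1 then (m.getD kv.1 (none, none)).1 else none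
      m.insert kv.1 (cv, some kv.2)) merged
  -- single classification pass over the merged table
  let acc := merged.items.foldl
    (fun (acc : PySem.Set String × PySem.Set String × PySem.Set String) kv =>
      if kv.2.2 = none then (PySem.Set.add acc.1 kv.1, acc.2.1, acc.2.2)
      else if kv.2.1 = none then (acc.1, PySem.Set.add acc.2.1 kv.1, acc.2.2)
      else if kv.2.1 ≠ kv.2.2 then (acc.1, acc.2.1, PySem.Set.add acc.2.2 kv.1)
      else acc)
    (PySem.Set.empty, PySem.Set.empty, PySem.Set.empty)
  (acc.1, acc.2.1, acc.2.2)

-- ===== PRECONDITION & SPEC =====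
def Spec_analyze_diff_mapping (currObj : List (String × Int)) (priorObj : List (String × Int)) (out : List String × List String × List String) : Prop := out = analyze_diff_mapping_alt currObj priorObj
instance (currObj : List (String × Int)) (priorObj : List (String × Int)) (out : List String × List String × List String) : Decidable (Spec_analyze_diff_mapping currObj priorObj out) := by unfold Spec_analyze_diff_mapping; infer_instance

-- ===== CLAIM (what is proved, stated in full; the proofs are below) =====
def Claim_equal_analyze_diff_mapping : Prop := ∀ (currObj : List (String × Int)) (priorObj : List (String × Int)), Dom_analyze_diff_mapping currObj priorObj → Spec_analyze_diff_mapping currObj priorObj (analyze_diff_mapping currObj priorObj)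

-- ===== LEMMAS AND PROOFS =====

-- A's loop over distinct keys, fed fresh accumulators, is a pair of filters.
theorem pv_pair_fold (q : String → Bool) (r : String → Prop) [DecidablePred r]
    (l : List String) (s t : PySem.Set String)
    (hl : l.Nodup) (hs : ∀ k ∈ l, k ∉ s) (ht : ∀ k ∈ l, k ∉ t) :
    l.foldl
      (fun (ac : PySem.Set String × PySem.Set String) key =>
        if q key then
          if r key then (ac.1, PySem.Set.add ac.2 key) else ac
        else (PySem.Set.add ac.1 key, ac.2)) (s, t)
    = (s ++ l.filter (fun k => !q k), t ++ l.filter (fun k => q k && decide (r k))) := by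
  induction l generalizing s t with
  | nil => simp
  | cons x xs ih =>
    have hx_s : x ∉ s := hs x (by simp)
    have hx_t : x ∉ t := ht x (by simp)
    have hadd_s : PySem.Set.add s x = s ++ [x] := PySem.Set.add_of_not_mem hx_s
    have hadd_t : PySem.Set.add t x = t ++ [x] := PySem.Set.add_of_not_mem hx_t
    have hxs_nodup : xs.Nodup := hl.of_cons
    have hx_not_xs : x ∉ xs := (List.nodup_cons.mp hl).1
    simp only [List.foldl_cons]
    by_cases hq : q x
    · by_cases hr : r x
      · rw [if_pos hq, if_pos hr]
        rw [ih _ _ hxs_nodup (fun k hk => hs k (by simp [hk]))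
            (fun k hk => by
              rw [hadd_t]; simp only [List.mem_append, List.mem_singleton]
              rintro (h | rfl)
              · exact ht k (by simp [hk]) h
              · exact hx_not_xs hk)]
        simp [hadd_t, hq, hr]
      · rw [if_pos hq, if_neg hr]
        rw [ih _ _ hxs_nodup (fun k hk => hs k (by simp [hk])) (fun k hk => ht k (by simp [hk]))]
        simp [hq, hr]
    · rw [if_neg hq]
      rw [ih _ _ hxs_nodup
          (fun k hk => by
            rw [hadd_s]; simp only [List.mem_append, List.mem_singleton]
            rintro (h | rfl)
            · exact hs k (by simp [hk]) h
            · exact hx_not_xs hk)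
          (fun k hk => ht k (by simp [hk]))]
      simp [hadd_s, hq]



theorem pv_get?_mk_append {ν : Type} (l₁ l₂ : List (String × ν)) (k : String) :
    (PySem.Dict.mk (l₁ ++ l₂)).get? k = ((PySem.Dict.mk l₁).get? k).or ((PySem.Dict.mk l₂).get? k) := by
  induction l₁ with
  | nil => rfl
  | cons x xs ih =>
    obtain ⟨k1, v1⟩ := x
    simp only [List.cons_append, PySem.Dict.get?_mk_cons, ih]
    by_cases h : k1 == k
    · simp [h]
    · simp [h]

theorem pv_phase2 (cI : List (String × Int)) (l : List (String × Int))
    (hc : (cI.map Prod.fst).Nodup) (hl : (l.map Prod.fst).Nodup) :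
    l.foldl
      (fun m kv =>
        let cv := if m.contains kv.1 then (m.getD kv.1 (none, none)).1 else none
        m.insert kv.1 (cv, some kv.2))
      (PySem.Dict.mk (cI.map (fun kv => (kv.1, ((some kv.2 : Option Int), (none : Option Int))))))
    = PySem.Dict.mk
        (cI.map (fun kv => (kv.1, ((some kv.2 : Option Int), (PySem.Dict.mk l).get? kv.1)))
         ++ (l.filter (fun kv => !((cI.map Prod.fst).contains kv.1))).map
              (fun kv => (kv.1, ((none : Option Int), (some kv.2 : Option Int))))) := by
  induction l using List.reverseRecOn with
  | nil =>
    simp only [List.foldl_nil, List.filter_nil, List.map_nil, List.append_nil]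
    apply PySem.Dict.ext
    exact (List.map_congr_left (fun kv _ => rfl)).symm ▸ rfl
  | append_singleton l x ih =>
    obtain ⟨xk, xv⟩ := x
    have hl' : (l.map Prod.fst).Nodup := by
      simpa using (List.nodup_append.mp (by simpa using hl)).1
    have hx : xk ∉ l.map Prod.fst := by
      have h := List.nodup_append.mp (by simpa using hl)
      intro hmem
      exact h.2.2 _ hmem xk (by simp) rfl
    rw [List.foldl_append, ih hl']
    set P1 := cI.map (fun kv => (kv.1, ((some kv.2 : Option Int), (PySem.Dict.mk l).get? kv.1))) with hP1
    set P2 := (l.filter (fun kv => !((cI.map Prod.fst).contains kv.1))).map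
        (fun kv => (kv.1, ((none : Option Int), (some kv.2 : Option Int)))) with hP2
    have hP1keys : P1.map Prod.fst = cI.map Prod.fst := by
      rw [hP1, List.map_map]; rfl
    have hP2fst : P2.map Prod.fst
        = (l.filter (fun kv => !((cI.map Prod.fst).contains kv.1))).map Prod.fst := by
      rw [hP2, List.map_map]; rfl
    have hP2keys : ∀ kv ∈ P2, kv.1 ∈ l.map Prod.fst ∧ kv.1 ∉ cI.map Prod.fst := by
      intro kv hkv
      rw [hP2] at hkv
      obtain ⟨kv', hkv', rfl⟩ := List.mem_map.mp hkv
      have h1 := List.mem_filter.mp hkv'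
      refine ⟨List.mem_map_of_mem h1.1, ?_⟩
      intro hcmem
      have h2 := h1.2
      simp only [Bool.not_eq_true', List.contains_eq_mem, decide_eq_false_iff_not] at h2
      exact h2 hcmem
    have hMkeys : ((PySem.Dict.mk (P1 ++ P2)).keys).Nodup := by
      show ((P1 ++ P2).map Prod.fst).Nodup
      rw [List.map_append, List.nodup_append]
      refine ⟨by rw [hP1keys]; exact hc, ?_, ?_⟩
      · rw [hP2fst]
        exact ((List.filter_sublist).map Prod.fst).nodup hl'
      · intro a ha b hb hab
        rw [hP1keys] at ha
        obtain ⟨kv, hkv, rfl⟩ := List.mem_map.mp hb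
        exact (hP2keys kv hkv).2 (hab ▸ ha)
    have hsingle : ∀ k, (PySem.Dict.mk [(xk, xv)]).get? k
        = if xk == k then some xv else none := by
      intro k
      rw [PySem.Dict.get?_mk_cons]
      by_cases h : xk == k
      · simp [h]
      · simp only [h, Bool.false_eq_true, if_false]
        rfl
    have hlkpx : (PySem.Dict.mk l).get? xk = none := by
      rw [PySem.Dict.get?_eq_none_iff_not_mem_keys]; exact hx
    have happend : ∀ k, (PySem.Dict.mk (l ++ [(xk, xv)])).get? k
        = if k = xk then some xv else (PySem.Dict.mk l).get? k := by
      intro k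
      rw [pv_get?_mk_append, hsingle]
      by_cases h : k = xk
      · subst h; rw [hlkpx]; simp
      · have : (xk == k) = false := by simp [Ne.symm h]
        rw [this]
        simp [h]
    show (PySem.Dict.mk (P1 ++ P2)).insert xk
        ((if (PySem.Dict.mk (P1 ++ P2)).contains xk = true
            then ((PySem.Dict.mk (P1 ++ P2)).getD xk (none, none)).1 else none), some xv) = _
    by_cases hmem : xk ∈ cI.map Prod.fst
    · -- xk is a key of currObj: the insert overwrites that entry in place
      have hcont : (PySem.Dict.mk (P1 ++ P2)).contains xk = true := by
        rw [PySem.Dict.contains_eq_decide_mem_keys]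
        show decide (xk ∈ (P1 ++ P2).map Prod.fst) = true
        simp only [decide_eq_true_eq, List.map_append, List.mem_append]
        exact Or.inl (hP1keys ▸ hmem)
      obtain ⟨kv0, hkv0, hkv0eq⟩ := List.mem_map.mp hmem
      have hentry : (xk, ((some kv0.2 : Option Int), (PySem.Dict.mk l).get? xk)) ∈ P1 ++ P2 := by
        refine List.mem_append_left _ (List.mem_map.mpr ⟨kv0, hkv0, ?_⟩)
        simp [hkv0eq]
      have hgetD : (PySem.Dict.mk (P1 ++ P2)).getD xk (none, none)
          = ((some kv0.2 : Option Int), (PySem.Dict.mk l).get? xk) :=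
        PySem.Dict.getD_of_mem_items _ hentry hMkeys _
      have hcv : (if (PySem.Dict.mk (P1 ++ P2)).contains xk = true
            then ((PySem.Dict.mk (P1 ++ P2)).getD xk (none, none)).1 else none) = some kv0.2 := by
        rw [hcont, if_pos rfl, hgetD]
      rw [hcv]
      apply PySem.Dict.ext
      rw [PySem.Dict.items_insert_of_contains _ _ hcont]
      show (P1 ++ P2).map _ = _
      have hfilt : ((l ++ [(xk, xv)]).filter (fun kv => !((cI.map Prod.fst).contains kv.1)))
          = l.filter (fun kv => !((cI.map Prod.fst).contains kv.1)) := by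
        rw [List.filter_append]
        suffices h : ([((xk : String), (xv : Int))].filter (fun kv => !((cI.map Prod.fst).contains kv.1))) = [] by
          rw [h, List.append_nil]
        simp [List.filter, hmem]
      rw [List.map_append, hfilt]
      congr 1
      · rw [hP1, List.map_map]
        apply List.map_congr_left
        intro kv hkv
        simp only [Function.comp_apply]
        by_cases hk : kv.1 = xk
        · have hkeq : (kv.1 == xk) = true := by simp [hk]
          rw [hkeq, if_pos rfl]
          have hentry' : (xk, ((some kv.2 : Option Int), (PySem.Dict.mk l).get? xk)) ∈ P1 ++ P2 := by
            refine List.mem_append_left _ (List.mem_map.mpr ⟨kv, hkv, ?_⟩)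
            simp [hk]
          have hgetD' := PySem.Dict.getD_of_mem_items _ hentry' hMkeys
            ((none : Option Int), (none : Option Int))
          have hv : kv0.2 = kv.2 := by
            have h12 := hgetD.symm.trans hgetD'
            simpa using (Prod.ext_iff.mp h12).1
          rw [happend, if_pos hk, hk, hv]
        · have hkeq : (kv.1 == xk) = false := by simp [hk]
          rw [hkeq]
          simp only [Bool.false_eq_true, if_false]
          rw [happend, if_neg hk]
      · rw [hP2, List.map_map]
        apply List.map_congr_left
        intro kv hkv
        have h1 := List.mem_filter.mp hkv
        have h2 : kv.1 ∉ cI.map Prod.fst := by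
          have := h1.2
          simp only [Bool.not_eq_true', List.contains_eq_mem, decide_eq_false_iff_not] at this
          exact this
        have hk : (kv.1 == xk) = false := by
          simp only [beq_eq_false_iff_ne, ne_eq]
          intro h; exact h2 (h ▸ hmem)
        simp only [Function.comp_apply, hk, Bool.false_eq_true, if_false]
    · -- fresh key: the insert appends
      have hcont : (PySem.Dict.mk (P1 ++ P2)).contains xk = false := by
        rw [PySem.Dict.contains_eq_decide_mem_keys]
        show decide (xk ∈ (P1 ++ P2).map Prod.fst) = false
        simp only [decide_eq_false_iff_not, List.map_append, List.mem_append]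
        rintro (h | h)
        · exact hmem (hP1keys ▸ h)
        · obtain ⟨kv, hkv, rfl⟩ := List.mem_map.mp h
          exact hx (hP2keys kv hkv).1
      have hcv : (if (PySem.Dict.mk (P1 ++ P2)).contains xk = true
            then ((PySem.Dict.mk (P1 ++ P2)).getD xk (none, none)).1 else none) = none := by
        rw [hcont]; simp
      rw [hcv]
      apply PySem.Dict.ext
      rw [PySem.Dict.items_insert_of_not_contains _ _ hcont]
      show (P1 ++ P2) ++ [(xk, (none, some xv))] = _
      have hfilt : ((l ++ [(xk, xv)]).filter (fun kv => !((cI.map Prod.fst).contains kv.1)))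
          = l.filter (fun kv => !((cI.map Prod.fst).contains kv.1)) ++ [(xk, xv)] := by
        rw [List.filter_append]
        congr 1
        simp [List.filter, hmem]
      rw [hfilt, List.map_append]
      rw [List.append_assoc]
      congr 1
      · rw [hP1]
        apply List.map_congr_left
        intro kv hkv
        have hk : kv.1 ≠ xk := fun h => hmem (h ▸ List.mem_map_of_mem hkv)
        rw [happend, if_neg hk]


theorem pv_triple_fold (l : List (String × (Option Int × Option Int)))
    (s t u : PySem.Set String)
    (hl : (l.map Prod.fst).Nodup)
    (hs : ∀ kv ∈ l, kv.1 ∉ s) (ht : ∀ kv ∈ l, kv.1 ∉ t) (hu : ∀ kv ∈ l, kv.1 ∉ u) :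
    l.foldl
      (fun (acc : PySem.Set String × PySem.Set String × PySem.Set String) kv =>
        if kv.2.2 = none then (PySem.Set.add acc.1 kv.1, acc.2.1, acc.2.2)
        else if kv.2.1 = none then (acc.1, PySem.Set.add acc.2.1 kv.1, acc.2.2)
        else if kv.2.1 ≠ kv.2.2 then (acc.1, acc.2.1, PySem.Set.add acc.2.2 kv.1)
        else acc) (s, t, u)
    = (s ++ (l.filter (fun kv => kv.2.2.isNone)).map Prod.fst,
       t ++ (l.filter (fun kv => !kv.2.2.isNone && kv.2.1.isNone)).map Prod.fst,
       u ++ (l.filter (fun kv => !kv.2.2.isNone && !kv.2.1.isNone && kv.2.1 != kv.2.2)).map Prod.fst) := by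
  induction l generalizing s t u with
  | nil => simp
  | cons x xs ih =>
    have hl2 := hl
    rw [List.map_cons, List.nodup_cons] at hl2
    have hxs_nodup : (xs.map Prod.fst).Nodup := hl2.2
    have hx_not : x.1 ∉ xs.map Prod.fst := hl2.1
    have hadd : ∀ (v : PySem.Set String), x.1 ∉ v → PySem.Set.add v x.1 = v ++ [x.1] :=
      fun v hv => PySem.Set.add_of_not_mem hv
    have hmemnew : ∀ kv ∈ xs, ∀ (v : PySem.Set String), kv.1 ∉ v → kv.1 ∉ v ++ [x.1] := by
      intro kv hkv v hv hmem
      rcases List.mem_append.mp hmem with h | h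
      · exact hv h
      · exact hx_not (List.mem_singleton.mp h ▸ List.mem_map_of_mem hkv)
    simp only [List.foldl_cons]
    by_cases h1 : x.2.2 = none
    · rw [if_pos h1, ih _ _ _ hxs_nodup
        (fun kv hkv => by
          rw [hadd s (hs x (by simp))]
          exact hmemnew kv hkv s (hs kv (by simp [hkv])))
        (fun kv hkv => ht kv (by simp [hkv])) (fun kv hkv => hu kv (by simp [hkv]))]
      rw [hadd s (hs x (by simp))]
      have h1' : x.2.2.isNone = true := by simp [h1]
      simp [List.filter, h1']
    · rw [if_neg h1]
      by_cases h2 : x.2.1 = none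
      · rw [if_pos h2, ih _ _ _ hxs_nodup
          (fun kv hkv => hs kv (by simp [hkv]))
          (fun kv hkv => by
            rw [hadd t (ht x (by simp))]
            exact hmemnew kv hkv t (ht kv (by simp [hkv])))
          (fun kv hkv => hu kv (by simp [hkv]))]
        rw [hadd t (ht x (by simp))]
        have h1' : x.2.2.isNone = false := by rw [Bool.eq_false_iff]; simp only [ne_eq, Option.isNone_iff_eq_none]; exact h1
        have h2' : x.2.1.isNone = true := by simp [h2]
        simp [List.filter, h1', h2']
      · rw [if_neg h2]
        by_cases h3 : x.2.1 ≠ x.2.2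
        · rw [if_pos h3, ih _ _ _ hxs_nodup
            (fun kv hkv => hs kv (by simp [hkv]))
            (fun kv hkv => ht kv (by simp [hkv]))
            (fun kv hkv => by
              rw [hadd u (hu x (by simp))]
              exact hmemnew kv hkv u (hu kv (by simp [hkv])))]
          rw [hadd u (hu x (by simp))]
          have h1' : x.2.2.isNone = false := by rw [Bool.eq_false_iff]; simp only [ne_eq, Option.isNone_iff_eq_none]; exact h1
          have h2' : x.2.1.isNone = false := by rw [Bool.eq_false_iff]; simp only [ne_eq, Option.isNone_iff_eq_none]; exact h2
          have h3' : (x.2.1 != x.2.2) = true := by simpa using h3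
          simp [List.filter, h1', h2', h3']
        · rw [if_neg h3, ih _ _ _ hxs_nodup
            (fun kv hkv => hs kv (by simp [hkv]))
            (fun kv hkv => ht kv (by simp [hkv]))
            (fun kv hkv => hu kv (by simp [hkv]))]
          have h1' : x.2.2.isNone = false := by rw [Bool.eq_false_iff]; simp only [ne_eq, Option.isNone_iff_eq_none]; exact h1
          have h2' : x.2.1.isNone = false := by rw [Bool.eq_false_iff]; simp only [ne_eq, Option.isNone_iff_eq_none]; exact h2
          have h3' : (x.2.1 != x.2.2) = false := by simpa using not_not.mp h3
          simp [List.filter, h1', h2', h3']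

theorem pv_main (currObj priorObj : List (String × Int)) :
    analyze_diff_mapping currObj priorObj = analyze_diff_mapping_alt currObj priorObj := by
  unfold analyze_diff_mapping analyze_diff_mapping_alt
  simp only []
  set c := PySem.Dict.ofList currObj with hc
  set p := PySem.Dict.ofList priorObj with hp
  have hck : c.keys.Nodup := PySem.Dict.nodup_keys_ofList currObj
  have hpk : p.keys.Nodup := PySem.Dict.nodup_keys_ofList priorObj
  -- A side
  rw [pv_pair_fold (fun key => p.contains key)
        (fun key => c.getD key 0 ≠ p.getD key 0) c.keys
        PySem.Set.empty PySem.Set.empty hck (by simp [PySem.Set.empty]) (by simp [PySem.Set.empty])]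
  -- B phase 1
  have hphase1 : c.items.foldl (fun m kv => m.insert kv.1 ((some kv.2 : Option Int), (none : Option Int))) PySem.Dict.empty
      = PySem.Dict.mk (c.items.map (fun kv => (kv.1, ((some kv.2 : Option Int), (none : Option Int))))) := by
    apply PySem.Dict.ext
    rw [PySem.Dict.items_foldl_insert_fresh c.items Prod.fst
          (fun kv => ((some kv.2 : Option Int), (none : Option Int))) PySem.Dict.empty
          (by intro a _; simp) hck]
    show PySem.Dict.empty.items ++ _ = _
    rw [show PySem.Dict.empty.items = ([] : List (String × Option Int × Option Int)) from rfl,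
        List.nil_append]
  rw [hphase1]
  -- B phase 2
  have hcfst : c.items.map Prod.fst = c.keys := rfl
  have hpfst : p.items.map Prod.fst = p.keys := rfl
  rw [pv_phase2 c.items p.items (by rw [hcfst]; exact hck) (by rw [hpfst]; exact hpk)]
  set P1 := c.items.map (fun kv => (kv.1, ((some kv.2 : Option Int), (PySem.Dict.mk p.items).get? kv.1))) with hP1
  set P2 := (p.items.filter (fun kv => !((c.items.map Prod.fst).contains kv.1))).map
      (fun kv => (kv.1, ((none : Option Int), (some kv.2 : Option Int)))) with hP2
  have hitems : (PySem.Dict.mk (P1 ++ P2)).items = P1 ++ P2 := rfl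
  rw [hitems]
  -- nodup of the merged key list
  have hP1keys : P1.map Prod.fst = c.items.map Prod.fst := by rw [hP1, List.map_map]; rfl
  have hP2fst : P2.map Prod.fst
      = (p.items.filter (fun kv => !((c.items.map Prod.fst).contains kv.1))).map Prod.fst := by
    rw [hP2, List.map_map]; rfl
  have hP2keys : ∀ kv ∈ P2, kv.1 ∈ p.items.map Prod.fst ∧ kv.1 ∉ c.items.map Prod.fst := by
    intro kv hkv
    rw [hP2] at hkv
    obtain ⟨kv', hkv', rfl⟩ := List.mem_map.mp hkv
    have h1 := List.mem_filter.mp hkv'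
    refine ⟨List.mem_map_of_mem h1.1, ?_⟩
    intro hcmem
    have h2 := h1.2
    simp only [Bool.not_eq_true', List.contains_eq_mem, decide_eq_false_iff_not] at h2
    exact h2 hcmem
  have hMkeys : ((P1 ++ P2).map Prod.fst).Nodup := by
    rw [List.map_append, List.nodup_append]
    refine ⟨by rw [hP1keys, hcfst]; exact hck, ?_, ?_⟩
    · rw [hP2fst]
      exact ((List.filter_sublist).map Prod.fst).nodup (by rw [hpfst]; exact hpk)
    · intro a ha b hb hab
      rw [hP1keys] at ha
      obtain ⟨kv, hkv, rfl⟩ := List.mem_map.mp hb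
      exact (hP2keys kv hkv).2 (hab ▸ ha)
  rw [pv_triple_fold (P1 ++ P2) PySem.Set.empty PySem.Set.empty PySem.Set.empty hMkeys
        (by simp [PySem.Set.empty]) (by simp [PySem.Set.empty]) (by simp [PySem.Set.empty])]
  have hconts : ∀ k, c.contains k = (c.items.map Prod.fst).contains k := by
    intro k
    rw [PySem.Dict.contains_eq_decide_mem_keys, List.contains_eq_mem, hcfst]
  refine Prod.ext ?_ (Prod.ext ?_ ?_)
  · -- added
    show _ = PySem.Set.empty ++ _
    rw [List.filter_append, List.map_append]
    have e2 : ((P2.filter (fun kv => kv.2.2.isNone)).map Prod.fst) = [] := by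
      rw [hP2, List.filter_map]
      rw [show ((fun (kv : String × Option Int × Option Int) => kv.2.2.isNone) ∘
            (fun (kv : String × Int) => (kv.1, ((none : Option Int), (some kv.2 : Option Int)))))
          = fun _ => false from funext (fun kv => rfl)]
      simp
    have e1 : (P1.filter (fun kv => kv.2.2.isNone)).map Prod.fst
        = c.keys.filter (fun k => !p.contains k) := by
      rw [hP1, List.filter_map, List.map_map, ← hcfst, List.filter_map]
      congr 1
      apply List.filter_congr
      intro kv _
      simp only [Function.comp_apply]
      rw [PySem.Dict.contains_eq_isSome_get?]
      show ((PySem.Dict.mk p.items).get? kv.1).isNone = !(p.get? kv.1).isSome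
      rw [show (PySem.Dict.mk p.items).get? kv.1 = p.get? kv.1 from rfl]
      cases hpg : p.get? kv.1 <;> rfl
    rw [e1, e2, List.append_nil]
  · -- deleted
    show _ = PySem.Set.empty ++ _
    rw [List.filter_append, List.map_append]
    have e1 : ((P1.filter (fun kv => !kv.2.2.isNone && kv.2.1.isNone)).map Prod.fst) = [] := by
      rw [hP1, List.filter_map]
      rw [show ((fun (kv : String × Option Int × Option Int) => !kv.2.2.isNone && kv.2.1.isNone) ∘
            (fun (kv : String × Int) => (kv.1, ((some kv.2 : Option Int), (PySem.Dict.mk p.items).get? kv.1))))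
          = fun _ => false from funext (fun kv => by simp)]
      simp
    have e2 : ((P2.filter (fun kv => !kv.2.2.isNone && kv.2.1.isNone)).map Prod.fst)
        = p.keys.filter (fun k => !c.contains k) := by
      rw [hP2, List.filter_map]
      rw [show ((fun (kv : String × Option Int × Option Int) => !kv.2.2.isNone && kv.2.1.isNone) ∘
            (fun (kv : String × Int) => (kv.1, ((none : Option Int), (some kv.2 : Option Int)))))
          = fun _ => true from funext (fun kv => rfl)]
      rw [List.filter_true, List.map_map, ← hpfst, List.filter_map]
      congr 1
      apply List.filter_congr
      intro kv _
      simp only [Function.comp_apply]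
      rw [hconts]
    rw [e1, e2, List.nil_append]
    rw [PySem.Set.ofList_eq_self_of_nodup _ ((List.filter_sublist).nodup hpk)]
    show _ = [] ++ _
    rw [List.nil_append]
  · -- changed
    show _ = PySem.Set.empty ++ _
    rw [List.filter_append, List.map_append]
    have e2 : ((P2.filter (fun kv => !kv.2.2.isNone && !kv.2.1.isNone && kv.2.1 != kv.2.2)).map Prod.fst) = [] := by
      rw [hP2, List.filter_map]
      rw [show ((fun (kv : String × Option Int × Option Int) => !kv.2.2.isNone && !kv.2.1.isNone && kv.2.1 != kv.2.2) ∘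
            (fun (kv : String × Int) => (kv.1, ((none : Option Int), (some kv.2 : Option Int)))))
          = fun _ => false from funext (fun kv => rfl)]
      simp
    have e1 : ((P1.filter (fun kv => !kv.2.2.isNone && !kv.2.1.isNone && kv.2.1 != kv.2.2)).map Prod.fst)
        = c.keys.filter (fun k => p.contains k && decide (c.getD k 0 ≠ p.getD k 0)) := by
      rw [hP1, List.filter_map, List.map_map, ← hcfst, List.filter_map]
      congr 1
      apply List.filter_congr
      intro kv hkv
      simp only [Function.comp_apply]
      have hcg : c.getD kv.1 0 = kv.2 := PySem.Dict.getD_of_mem_items c hkv hck 0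
      rw [PySem.Dict.contains_eq_isSome_get?, PySem.Dict.getD_eq_get?_getD p, hcg]
      show (!((PySem.Dict.mk p.items).get? kv.1).isNone && !(some kv.2 : Option Int).isNone &&
          ((some kv.2 : Option Int) != (PySem.Dict.mk p.items).get? kv.1))
        = ((p.get? kv.1).isSome && decide (kv.2 ≠ (p.get? kv.1).getD 0))
      rw [show (PySem.Dict.mk p.items).get? kv.1 = p.get? kv.1 from rfl]
      cases hpg : p.get? kv.1 with
      | none => rfl
      | some w => simp [bne]; rfl
    rw [e1, e2, List.append_nil]

-- ===== VERDICT (by name: the statement is the Claim_ definition above) =====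
theorem analyze_diff_mapping_spec : Claim_equal_analyze_diff_mapping := by
  intro currObj priorObj _
  unfold Spec_analyze_diff_mapping
  exact pv_main currObj priorObj
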